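-- pv_equiv track=rewrite | github.com/pypi-data/pypi-mirror-284 | packages/BioTEMPy/BioTEMPy-2.2.0a3.tar.gz/BioTEMPy-2.2.0a3/TEMPy/math/fourier.py | get_fft_optimised_box_size
-- ===== SOURCE A (Python) =====
-- def get_fft_optimised_box_size(particle_diameter, map_box_size):
--     """Get a box size which is optimal for fast FFT calculation
--
--     Calculating the FFT using an optimised library should be
--     fastest for boxes whose size is a power of two (e.g. 128,
--     512, etc..]. FFT calculation will also be very fast for
--     boxes with a size (N * 2^x) when N is a small number (e.g.
--     3 or 5). However, calculating FFTs on boxes whose size is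
--     a prime number (e.g. 89), will be comparatively slow, so
--     to speed this up (and more finely sample fourier space) we
--     pad these boxes to an appropriate/optimised size, which
--     in this case would be 96 (3 * 2^5).
--
--     Arguments:
--         particle_diameter: Length of particle (in pixels)
--             along its longest axis
--         map_box_size:
--
--     Returns: Optimised cubic box size as a python list with
--         len = 3.
--     """
--     power_two = 2
--     power_three = 3
--     power_five = 5
--
--     while True:
--         if particle_diameter <= power_two:
--             box_size = power_two
--             break
--         elif particle_diameter <= power_three:
--             box_size = power_three
--             break
--         elif particle_diameter <= power_five:
--             box_size = power_five
--             break
--         else: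
--             power_two = power_two * 2
--             power_three = power_three * 2
--             power_five = power_five * 2
--
--     # check if crop_box is bigger than full map
--     for dim in map_box_size:
--         if dim < box_size:
--             return map_box_size
--
--     return [box_size, box_size, box_size]
-- ===== SOURCE B (Python) =====
-- def get_fft_optimised_box_size(particle_diameter, map_box_size):
--     # Loop-free closed form: the doubling search always stops at scale f = 2^k
--     # where k is minimal with particle_diameter <= 5 * 2^k, i.e. 2^k >= ceil(d/5).
--     q = -(-particle_diameter // 5)      # ceil(particle_diameter / 5)
--     k = max(q - 1, 0).bit_length()      # minimal k with 2^k >= q (0 if q <= 1)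
--     f = 1 << k
--     if particle_diameter <= 2 * f:
--         box_size = 2 * f
--     elif particle_diameter <= 3 * f:
--         box_size = 3 * f
--     else:
--         box_size = 5 * f
--     if map_box_size and min(map_box_size) < box_size:
--         return map_box_size
--     return [box_size, box_size, box_size]
-- ===== Notes on version B (the rewrite author's own statement) =====
-- stated objective: simpler
-- what changed: Replaced A's while-True loop that doubles three candidate sizes until one reaches the diameter by a loop-free closed form (2^k with k = bit_length of ceil(diameter/5)-1, then one if/elif), and the early-return dimension scan by a single min() comparison.
import Mathlib
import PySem

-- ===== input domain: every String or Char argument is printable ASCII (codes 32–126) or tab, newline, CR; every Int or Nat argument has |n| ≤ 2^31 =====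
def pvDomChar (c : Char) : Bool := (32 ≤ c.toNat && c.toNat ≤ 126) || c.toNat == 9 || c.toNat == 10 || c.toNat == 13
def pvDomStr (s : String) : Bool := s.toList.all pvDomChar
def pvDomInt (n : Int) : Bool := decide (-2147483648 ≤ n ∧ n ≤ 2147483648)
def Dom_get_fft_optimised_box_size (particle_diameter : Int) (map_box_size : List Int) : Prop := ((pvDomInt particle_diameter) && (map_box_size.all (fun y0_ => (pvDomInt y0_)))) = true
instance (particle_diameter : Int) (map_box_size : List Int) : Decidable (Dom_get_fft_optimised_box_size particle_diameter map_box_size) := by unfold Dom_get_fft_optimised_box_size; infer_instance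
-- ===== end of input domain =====

-- B replaces A's fused doubling loop by a loop-free closed form (ceil-division + bit_length) and a min-based map cap; objective: simpler.


-- ===== PORT A =====
-- Port of A: the while-True loop doubling (power_two, power_three, power_five) together,
-- then the for-loop over map_box_size with early return.  The loop is ported with a
-- fuel argument for totality only: fuel particle_diameter.toNat is proved sufficient
-- below, so the port computes exactly what the Python loop computes.
def pvLoopA (pd p2 p3 p5 : Int) : Nat → Int
  | 0 => if pd ≤ p2 then p2 else if pd ≤ p3 then p3 else p5
  | n + 1 =>
    if pd ≤ p2 then p2
    else if pd ≤ p3 then p3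
    else if pd ≤ p5 then p5
    else pvLoopA pd (p2 * 2) (p3 * 2) (p5 * 2) n

def pvForA (orig rest : List Int) (b : Int) : List Int :=
  match rest with
  | [] => [b, b, b]
  | d :: ds => if d < b then orig else pvForA orig ds b

def get_fft_optimised_box_size (particle_diameter : Int) (map_box_size : List Int) : List Int :=
  let box_size := pvLoopA particle_diameter 2 3 5 particle_diameter.toNat
  pvForA map_box_size map_box_size box_size

-- ===== PORT B =====
-- Port of B: loop-free closed form.  q = ceil(pd/5) via -(-pd // 5); k = bit_length of
-- max(q-1, 0); f = 2^k; one if/elif picks the candidate; min() gives the map cap.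
def get_fft_optimised_box_size_alt (particle_diameter : Int) (map_box_size : List Int) : List Int :=
  let q : Int := -(PySem.Int.floordiv (-particle_diameter) 5)
  let k : Nat := PySem.Int.bitLength (max (q - 1) 0)
  let f : Int := (2:Int) ^ k
  let box_size : Int :=
    if particle_diameter ≤ 2 * f then 2 * f
    else if particle_diameter ≤ 3 * f then 3 * f
    else 5 * f
  match PySem.List.min? map_box_size (fun x => x) with
  | some m => if m < box_size then map_box_size else [box_size, box_size, box_size]
  | none => [box_size, box_size, box_size]

-- ===== PRECONDITION & SPEC =====
def Spec_get_fft_optimised_box_size (particle_diameter : Int) (map_box_size : List Int) (out : List Int) : Prop := out = get_fft_optimised_box_size_alt particle_diameter map_box_size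
instance (particle_diameter : Int) (map_box_size : List Int) (out : List Int) : Decidable (Spec_get_fft_optimised_box_size particle_diameter map_box_size out) := by unfold Spec_get_fft_optimised_box_size; infer_instance

-- ===== CLAIM (what is proved, stated in full; the proofs are below) =====
def Claim_equal_get_fft_optimised_box_size : Prop := ∀ (particle_diameter : Int) (map_box_size : List Int), Dom_get_fft_optimised_box_size particle_diameter map_box_size → Spec_get_fft_optimised_box_size particle_diameter map_box_size (get_fft_optimised_box_size particle_diameter map_box_size)

-- ===== LEMMAS AND PROOFS =====

-- ceil bounds: q = -(-pd // 5) satisfies 5*(q-1) < pd <= 5*q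
theorem pvCeil_bounds (pd : Int) :
    (-(PySem.Int.floordiv (-pd) 5) - 1) * 5 < pd ∧ pd ≤ -(PySem.Int.floordiv (-pd) 5) * 5 :=
  (PySem.Int.neg_floordiv_neg_eq_iff_of_pos (by norm_num)).mp rfl

-- K = bitLength (max (q-1) 0) reaches pd: pd ≤ 5 * 2^K
theorem pvK_reaches (pd : Int) :
    pd ≤ 5 * (2:Int) ^ (PySem.Int.bitLength (max (-(PySem.Int.floordiv (-pd) 5) - 1) 0)) := by
  set q : Int := -(PySem.Int.floordiv (-pd) 5) with hq
  obtain ⟨_, h2⟩ := pvCeil_bounds pd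
  set K := PySem.Int.bitLength (max (q - 1) 0) with hK
  have hpow : (1:Int) ≤ (2:Int) ^ K := one_le_pow₀ (by norm_num)
  by_cases hq1 : q ≤ 1
  · nlinarith
  · have hmax : max (q - 1) 0 = q - 1 := max_eq_left (by omega)
    have hlt := PySem.Int.lt_two_pow_bitLength (max (q - 1) 0)
    rw [hmax] at hlt
    have hcast : (((2:Nat) ^ (PySem.Int.bitLength (q - 1)) : Nat) : Int)
        = (2:Int) ^ (PySem.Int.bitLength (q - 1)) := by push_cast; ring
    have h3 : (q - 1 : Int) < (2:Int) ^ (PySem.Int.bitLength (q - 1)) := by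
      have := hlt
      omega
    rw [hK, hmax]
    nlinarith

-- minimality: any m with pd ≤ 5 * 2^m has K ≤ m
theorem pvK_min (pd : Int) (m : Nat) (hm : pd ≤ 5 * (2:Int) ^ m) :
    PySem.Int.bitLength (max (-(PySem.Int.floordiv (-pd) 5) - 1) 0) ≤ m := by
  set q : Int := -(PySem.Int.floordiv (-pd) 5) with hq
  obtain ⟨h1, _⟩ := pvCeil_bounds pd
  by_cases hq1 : q ≤ 1
  · have hmax : max (q - 1) 0 = 0 := max_eq_right (by omega)
    rw [hmax]
    simp [PySem.Int.bitLength_zero]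
  · have hmax : max (q - 1) 0 = q - 1 := max_eq_left (by omega)
    rw [hmax]
    have hne : (q - 1 : Int) ≠ 0 := by omega
    have hlow := PySem.Int.two_pow_bitLength_le (q - 1) hne
    have hqm : (q - 1 : Int) < (2:Int) ^ m := by
      nlinarith [pow_pos (show (0:Int) < 2 by norm_num) m]
    have hqmN : (q - 1).natAbs < (2:Nat) ^ m := by
      have h' : (((q - 1).natAbs : Nat) : Int) < (((2:Nat) ^ m : Nat) : Int) := by
        rw [Int.natAbs_of_nonneg (by omega)]
        push_cast
        exact hqm
      exact_mod_cast h' 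
    set K := PySem.Int.bitLength (q - 1) with hK
    have hK1 : 1 ≤ K := by
      have hlt := PySem.Int.lt_two_pow_bitLength (q - 1)
      rw [← hK] at hlt
      by_contra h
      have hK0 : K = 0 := by omega
      rw [hK0] at hlt
      simp at hlt
      omega
    have hpp : (2:Nat) ^ (K - 1) < (2:Nat) ^ m := lt_of_le_of_lt hlow hqmN
    have := (Nat.pow_lt_pow_iff_right (by norm_num : 1 < 2)).mp hpp
    omega

-- with enough fuel, A's loop at scale 2^j computes B's closed-form selection at 2^K
theorem pvLoopA_eq (pd : Int) (K : Nat)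
    (hK1 : pd ≤ 5 * (2:Int) ^ K) (hK2 : ∀ m : Nat, pd ≤ 5 * (2:Int) ^ m → K ≤ m) :
    ∀ (n j : Nat), j ≤ K → K ≤ j + n →
      pvLoopA pd (2 * (2:Int) ^ j) (3 * (2:Int) ^ j) (5 * (2:Int) ^ j) n =
        (if pd ≤ 2 * (2:Int) ^ K then 2 * (2:Int) ^ K
         else if pd ≤ 3 * (2:Int) ^ K then 3 * (2:Int) ^ K
         else 5 * (2:Int) ^ K) := by
  intro n
  induction n with
  | zero =>
    intro j hj hn
    have hjK : j = K := by omega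
    subst hjK
    rw [pvLoopA]
  | succ n ih =>
    intro j hj hn
    rw [pvLoopA]
    by_cases h5 : pd ≤ 5 * (2:Int) ^ j
    · have hjK : j = K := le_antisymm hj (hK2 j h5)
      subst hjK
      by_cases h2 : pd ≤ 2 * (2:Int) ^ j
      · simp [h2]
      · by_cases h3 : pd ≤ 3 * (2:Int) ^ j
        · simp [h2, h3]
        · simp [h2, h3, h5]
    · have h2 : ¬ pd ≤ 2 * (2:Int) ^ j := by
        intro h; exact h5 (by nlinarith [pow_pos (show (0:Int) < 2 by norm_num) j])
      have h3 : ¬ pd ≤ 3 * (2:Int) ^ j := by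
        intro h; exact h5 (by nlinarith [pow_pos (show (0:Int) < 2 by norm_num) j])
      rw [if_neg h2, if_neg h3, if_neg h5]
      have hjlt : j < K := by
        by_contra hc
        have hle : (2:Int) ^ K ≤ (2:Int) ^ j := pow_le_pow_right₀ (by norm_num) (by omega)
        exact h5 (le_trans hK1 (by nlinarith))
      have e2 : 2 * (2:Int) ^ j * 2 = 2 * (2:Int) ^ (j + 1) := by ring
      have e3 : 3 * (2:Int) ^ j * 2 = 3 * (2:Int) ^ (j + 1) := by ring
      have e5 : 5 * (2:Int) ^ j * 2 = 5 * (2:Int) ^ (j + 1) := by ring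
      rw [e2, e3, e5]
      exact ih (j + 1) (by omega) (by omega)

-- fuel pd.toNat is sufficient: pd ≤ 5 * 2 ^ pd.toNat
theorem pvFuel_ok (pd : Int) : pd ≤ 5 * (2:Int) ^ pd.toNat := by
  by_cases h : pd ≤ 0
  · have : (0:Int) < (2:Int) ^ pd.toNat := by positivity
    omega
  · have h1 : pd = (pd.toNat : Int) := (Int.toNat_of_nonneg (by omega)).symm
    have h2 : pd.toNat < 2 ^ pd.toNat := Nat.lt_two_pow_self
    have h3 : (pd.toNat : Int) < (2:Int) ^ pd.toNat := by exact_mod_cast h2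
    have : (0:Int) < (2:Int) ^ pd.toNat := by positivity
    omega

-- A's early-return for-loop equals B's min-based cap
theorem pvForA_eq_min (orig : List Int) (b : Int) :
    pvForA orig orig b =
      (match PySem.List.min? orig (fun x => x) with
       | some m => if m < b then orig else [b, b, b]
       | none => [b, b, b]) := by
  have key : ∀ rest : List Int, pvForA orig rest b =
      (if rest.any (fun d => decide (d < b)) then orig else [b, b, b]) := by
    intro rest
    induction rest with
    | nil => simp [pvForA]
    | cons d ds ih =>
      rw [pvForA]
      by_cases h : d < b
      · simp [h]
      · simp [h, ih]
  rw [key]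
  cases hmin : PySem.List.min? orig (fun x => x) with
  | none =>
    have : orig = [] := (PySem.List.min?_eq_none_iff orig (fun x => x)).mp hmin
    subst this
    simp
  | some m =>
    have hmem : m ∈ orig := PySem.List.min?_mem hmin
    have hisMin := PySem.List.min?_isMin hmin
    by_cases h : m < b
    · have hany : orig.any (fun d => decide (d < b)) = true := by
        simp only [List.any_eq_true]
        exact ⟨m, hmem, by simpa using h⟩
      simp [hany, h]
    · have hany : orig.any (fun d => decide (d < b)) = false := by
        simp only [List.any_eq_false]
        intro x hx
        have := hisMin x hx
        simp only [decide_eq_true_eq]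
        omega
      simp [hany, h]

-- ===== VERDICT (by name: the statement is the Claim_ definition above) =====
theorem get_fft_optimised_box_size_spec : Claim_equal_get_fft_optimised_box_size := by
  intro pd mbs _
  unfold Spec_get_fft_optimised_box_size get_fft_optimised_box_size get_fft_optimised_box_size_alt
  have hK1 := pvK_reaches pd
  have hK2 := pvK_min pd
  have hloop := pvLoopA_eq pd _ hK1 hK2 pd.toNat 0 (Nat.zero_le _)
    (by simpa using hK2 pd.toNat (pvFuel_ok pd))
  simp only [pow_zero, mul_one] at hloop
  rw [hloop, pvForA_eq_min]
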